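-- pv_equiv track=rewrite | github.com/winstonjay/scrapbook | homunculus/wikisearch.py | old_merge_paths
-- ===== SOURCE A (Python) =====
-- def old_merge_paths(l_front, overlaps, r_front):
--     paths = []
--     best = 1000
--     # when only getting the first reverse queues.
--     for overlap in overlaps:
--         for left in l_front:
--             if overlap in left:
--                 for right in r_front:
--                     if overlap in right:
--                         path = left[:left.index(overlap)] + list(reversed(right))
--                         if path not in paths and len(path) < best:
--                             best = len(path)
--                             paths.append(path)
--     return paths
-- ===== SOURCE B (Python) =====
-- def old_merge_paths(l_front, overlaps, r_front):
--     # Index: element -> prefixes of the left paths containing it (cut at first occurrence),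
--     # and element -> reversed right paths containing it; then fetch only matching paths.
--     # The 'path not in paths' test of the original is dropped: appended lengths strictly
--     # decrease, so a strictly shorter path can never be a duplicate.
--     left_ix = {}
--     for left in l_front:
--         for x in dict.fromkeys(left):
--             left_ix.setdefault(x, []).append(left[:left.index(x)])
--     right_ix = {}
--     for right in r_front:
--         rev = list(reversed(right))
--         for x in dict.fromkeys(right):
--             right_ix.setdefault(x, []).append(rev)
--     paths = []
--     best = 1000
--     for overlap in overlaps:
--         for pre in left_ix.get(overlap, []):
--             for rev in right_ix.get(overlap, []):
--                 if len(pre) + len(rev) < best: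
--                     path = pre + rev
--                     best = len(path)
--                     paths.append(path)
--     return paths
-- ===== Notes on version B (the rewrite author's own statement) =====
-- stated objective: faster
-- what changed: B builds element->matching-prefix and element->reversed-path indexes once, then each overlap fetches only its matching paths instead of scanning all left/right paths; the redundant 'path not in paths' membership scan is dropped (appended lengths strictly decrease, so duplicates are impossible).
import Mathlib
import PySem

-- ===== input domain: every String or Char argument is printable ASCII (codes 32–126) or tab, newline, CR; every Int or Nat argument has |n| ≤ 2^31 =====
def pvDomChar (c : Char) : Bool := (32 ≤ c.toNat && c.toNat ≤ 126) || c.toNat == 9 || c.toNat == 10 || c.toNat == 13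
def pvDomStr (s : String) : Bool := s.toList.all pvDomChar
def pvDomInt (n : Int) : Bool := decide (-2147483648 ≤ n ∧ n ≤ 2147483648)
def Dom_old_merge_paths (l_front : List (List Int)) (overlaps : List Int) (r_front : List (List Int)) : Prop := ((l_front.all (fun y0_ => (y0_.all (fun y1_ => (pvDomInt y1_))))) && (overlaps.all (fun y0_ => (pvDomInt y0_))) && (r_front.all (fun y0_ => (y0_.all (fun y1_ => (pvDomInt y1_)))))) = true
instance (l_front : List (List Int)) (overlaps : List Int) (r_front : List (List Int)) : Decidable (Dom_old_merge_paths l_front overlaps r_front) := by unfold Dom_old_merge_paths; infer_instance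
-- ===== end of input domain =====

-- B replaces A's rescans of all left/right paths per overlap by element-indexed lookups and
-- drops A's redundant duplicate test (objective: faster).

-- ===== PORT A =====
-- `left[:left.index(overlap)]` is only reached under `overlap in left`, so index? is some;
-- the nonnegative slice is List.take.
def old_merge_paths (l_front : List (List Int)) (overlaps : List Int) (r_front : List (List Int)) : List (List Int) :=
  (overlaps.foldl (fun st overlap =>
    l_front.foldl (fun st left =>
      if overlap ∈ left then
        r_front.foldl (fun st right =>
          if overlap ∈ right then
            let path := left.take ((PySem.List.index? left overlap).getD 0) ++ right.reverse
            if path ∉ st.1 ∧ (path.length : Int) < st.2 then (st.1 ++ [path], (path.length : Int)) else st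
          else st) st
      else st) st)
    ([], 1000)).1

-- ===== PORT B =====
-- `dict.fromkeys(left)` iteration = PySem.List.dedup; `setdefault(x, []).append(v)` = Dict.modify x [] (· ++ [v]).
def old_merge_paths_alt (l_front : List (List Int)) (overlaps : List Int) (r_front : List (List Int)) : List (List Int) :=
  let left_ix : PySem.Dict Int (List (List Int)) :=
    l_front.foldl (fun d left =>
      (PySem.List.dedup left).foldl (fun d x =>
        d.modify x [] (fun cur => cur ++ [left.take ((PySem.List.index? left x).getD 0)])) d)
      PySem.Dict.empty
  let right_ix : PySem.Dict Int (List (List Int)) :=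
    r_front.foldl (fun d right =>
      let rev := right.reverse
      (PySem.List.dedup right).foldl (fun d x =>
        d.modify x [] (fun cur => cur ++ [rev])) d)
      PySem.Dict.empty
  (overlaps.foldl (fun st overlap =>
    (left_ix.getD overlap []).foldl (fun st pre =>
      (right_ix.getD overlap []).foldl (fun st rev =>
        if ((pre.length : Int) + (rev.length : Int)) < st.2 then
          (st.1 ++ [pre ++ rev], ((pre ++ rev).length : Int)) else st) st) st)
    ([], 1000)).1

-- ===== PRECONDITION & SPEC =====
def Spec_old_merge_paths (l_front : List (List Int)) (overlaps : List Int) (r_front : List (List Int)) (out : List (List Int)) : Prop := out = old_merge_paths_alt l_front overlaps r_front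
instance (l_front : List (List Int)) (overlaps : List Int) (r_front : List (List Int)) (out : List (List Int)) : Decidable (Spec_old_merge_paths l_front overlaps r_front out) := by unfold Spec_old_merge_paths; infer_instance

-- ===== CLAIM (what is proved, stated in full; the proofs are below) =====
def Claim_equal_old_merge_paths : Prop := ∀ (l_front : List (List Int)) (overlaps : List Int) (r_front : List (List Int)), Dom_old_merge_paths l_front overlaps r_front → Spec_old_merge_paths l_front overlaps r_front (old_merge_paths l_front overlaps r_front)

-- ===== LEMMAS AND PROOFS =====

-- the prefix of l before the first occurrence of o
def pvPfx (o : Int) (l : List Int) : List Int := l.take ((PySem.List.index? l o).getD 0)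

-- state of the collecting loop
lemma pv_getD_modify_append_list (l : List Int) (f : Int → List Int)
    (d : PySem.Dict Int (List (List Int))) (o : Int) :
    (l.foldl (fun d x => d.modify x [] (fun cur => cur ++ [f x])) d).getD o []
      = d.getD o [] ++ (l.filter (· == o)).map f := by
  induction l generalizing d with
  | nil => simp
  | cons x xs ih =>
    simp only [List.foldl_cons, ih, List.filter_cons]
    rw [PySem.Dict.getD_modify]
    by_cases h : o = x
    · subst h
      simp
    · have hne : (x == o) = false := beq_eq_false_iff_ne.mpr (Ne.symm h)
      simp [h, hne]

lemma pv_filter_nodup (l : List Int) (o : Int) (hnd : l.Nodup) :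
    l.filter (· == o) = if o ∈ l then [o] else [] := by
  induction l with
  | nil => simp
  | cons x xs ih =>
    simp only [List.nodup_cons] at hnd
    rw [List.filter_cons]
    by_cases h : x = o
    · subst h
      have : x ∉ xs := hnd.1
      have hf : xs.filter (· == x) = [] := by
        rw [ih hnd.2]; simp [this]
      simp [hf]
    · have : (x == o) = false := by simp [h]
      rw [this]
      simp only [ih hnd.2, List.mem_cons]
      by_cases ho : o ∈ xs <;> simp [ho, Ne.symm h]

lemma pv_filter_dedup (l : List Int) (o : Int) :
    (PySem.List.dedup l).filter (· == o) = if o ∈ l then [o] else [] := by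
  rw [pv_filter_nodup _ _ (PySem.List.nodup_dedup l)]
  simp

lemma pv_getD_buildL (l_front : List (List Int)) (d : PySem.Dict Int (List (List Int))) (o : Int) :
    (l_front.foldl (fun d left =>
      (PySem.List.dedup left).foldl (fun d x =>
        d.modify x [] (fun cur => cur ++ [left.take ((PySem.List.index? left x).getD 0)])) d) d).getD o []
    = d.getD o [] ++ (l_front.filter (fun l => decide (o ∈ l))).map (pvPfx o) := by
  induction l_front generalizing d with
  | nil => simp
  | cons left rest ih =>
    simp only [List.foldl_cons, ih, List.filter_cons]
    rw [pv_getD_modify_append_list, pv_filter_dedup]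
    by_cases h : o ∈ left
    · simp [h, pvPfx]
    · simp [h]

lemma pv_getD_buildR (r_front : List (List Int)) (d : PySem.Dict Int (List (List Int))) (o : Int) :
    (r_front.foldl (fun d right =>
      (PySem.List.dedup right).foldl (fun d x =>
        d.modify x [] (fun cur => cur ++ [right.reverse])) d) d).getD o []
    = d.getD o [] ++ (r_front.filter (fun r => decide (o ∈ r))).map List.reverse := by
  induction r_front generalizing d with
  | nil => simp
  | cons right rest ih =>
    simp only [List.foldl_cons, ih, List.filter_cons]
    rw [pv_getD_modify_append_list, pv_filter_dedup]
    by_cases h : o ∈ right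
    · simp [h]
    · simp [h]

-- invariant: best is a lower bound of the lengths of all collected paths
def pvInv (st : List (List Int) × Int) : Prop := ∀ q ∈ st.1, st.2 ≤ (q.length : Int)

lemma pv_fold_eq_of_inv {α : Type} (f g : (List (List Int) × Int) → α → (List (List Int) × Int))
    (h : ∀ st x, pvInv st → f st x = g st x ∧ pvInv (f st x)) :
    ∀ (l : List α) (st : List (List Int) × Int), pvInv st →
      l.foldl f st = l.foldl g st ∧ pvInv (l.foldl f st) := by
  intro l
  induction l with
  | nil => intro st hst; exact ⟨rfl, hst⟩
  | cons x xs ih =>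
    intro st hst
    obtain ⟨he, hi⟩ := h st x hst
    obtain ⟨he', hi'⟩ := ih (f st x) hi
    exact ⟨by simp only [List.foldl_cons, he] at he' ⊢; exact he', hi'⟩

lemma pv_step_eq (st : List (List Int) × Int) (pre rev : List Int) (hst : pvInv st) :
    ((if (pre ++ rev) ∉ st.1 ∧ ((pre ++ rev).length : Int) < st.2
        then (st.1 ++ [pre ++ rev], ((pre ++ rev).length : Int)) else st)
      = (if ((pre.length : Int) + (rev.length : Int)) < st.2
        then (st.1 ++ [pre ++ rev], ((pre ++ rev).length : Int)) else st))
    ∧ pvInv (if (pre ++ rev) ∉ st.1 ∧ ((pre ++ rev).length : Int) < st.2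
        then (st.1 ++ [pre ++ rev], ((pre ++ rev).length : Int)) else st) := by
  set p := pre ++ rev with hp
  have hlen : ((pre.length : Int) + (rev.length : Int)) = (p.length : Int) := by
    simp [hp]
  rw [hlen]
  by_cases hl : (p.length : Int) < st.2
  · have hnm : p ∉ st.1 := by
      intro hmem
      exact absurd hl (not_lt.mpr (hst p hmem))
    rw [if_pos ⟨hnm, hl⟩, if_pos hl]
    refine ⟨rfl, ?_⟩
    intro q hq
    simp only [List.mem_append, List.mem_singleton] at hq
    rcases hq with hq | hq
    · exact le_trans (le_of_lt hl) (hst q hq)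
    · subst hq; exact le_refl _
  · have hno : ¬ (p ∉ st.1 ∧ (p.length : Int) < st.2) := fun h => hl h.2
    rw [if_neg hno, if_neg hl]
    exact ⟨rfl, hst⟩

lemma pv_inner_eq (lefts rights : List (List Int)) (st : List (List Int) × Int)
    (hst : pvInv st) :
    (lefts.foldl (fun st pre =>
        rights.foldl (fun st rev =>
          if (pre ++ rev) ∉ st.1 ∧ ((pre ++ rev).length : Int) < st.2
          then (st.1 ++ [pre ++ rev], ((pre ++ rev).length : Int)) else st) st) st
      = lefts.foldl (fun st pre =>
        rights.foldl (fun st rev =>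
          if ((pre.length : Int) + (rev.length : Int)) < st.2
          then (st.1 ++ [pre ++ rev], ((pre ++ rev).length : Int)) else st) st) st)
    ∧ pvInv (lefts.foldl (fun st pre =>
        rights.foldl (fun st rev =>
          if (pre ++ rev) ∉ st.1 ∧ ((pre ++ rev).length : Int) < st.2
          then (st.1 ++ [pre ++ rev], ((pre ++ rev).length : Int)) else st) st) st) := by
  refine pv_fold_eq_of_inv _ _ ?_ lefts st hst
  intro st pre hst
  refine pv_fold_eq_of_inv _ _ ?_ rights st hst
  intro st rev hst
  exact pv_step_eq st pre rev hst

-- ===== VERDICT (by name: the statement is the Claim_ definition above) =====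
theorem old_merge_paths_spec : Claim_equal_old_merge_paths := by
  intro l_front overlaps r_front _
  unfold Spec_old_merge_paths old_merge_paths old_merge_paths_alt
  congr 1
  refine (pv_fold_eq_of_inv _ _ ?_ overlaps ([], 1000) (by intro q hq; simp at hq)).1
  intro st o hst
  -- rewrite A's per-overlap double scan into a fold over the fetched index lists
  have hA :
      l_front.foldl (fun st left =>
        if o ∈ left then
          r_front.foldl (fun st right =>
            if o ∈ right then
              let path := left.take ((PySem.List.index? left o).getD 0) ++ right.reverse
              if path ∉ st.1 ∧ (path.length : Int) < st.2 then (st.1 ++ [path], (path.length : Int)) else st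
            else st) st
        else st) st
      = ((l_front.filter (fun l => decide (o ∈ l))).map (pvPfx o)).foldl (fun st pre =>
          ((r_front.filter (fun r => decide (o ∈ r))).map List.reverse).foldl (fun st rev =>
            if (pre ++ rev) ∉ st.1 ∧ ((pre ++ rev).length : Int) < st.2
            then (st.1 ++ [pre ++ rev], ((pre ++ rev).length : Int)) else st) st) st := by
    rw [PySem.List.foldl_ite_eq_foldl_filter, List.foldl_map]
    apply PySem.List.foldl_congr_mem
    intro acc left _
    rw [PySem.List.foldl_ite_eq_foldl_filter, List.foldl_map]
    rfl
  rw [hA, pv_getD_buildL, pv_getD_buildR]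
  simp only [PySem.Dict.getD_empty, List.nil_append]
  exact pv_inner_eq _ _ st hst
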